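-- pv_equiv track=rewrite | github.com/Pazificateur69/NightOwl | benchmarks/summary.py | latest_and_previous_results_by_target
-- ===== SOURCE A (Python) =====
-- def latest_and_previous_results_by_target(results: list[dict]) -> dict[str, dict[str, dict | None]]:
--     grouped: dict[str, list[dict]] = {}
--     for result in results:
--         grouped.setdefault(result.get("target_name", "unknown"), []).append(result)
--
--     output: dict[str, dict[str, dict | None]] = {}
--     for target, target_results in grouped.items():
--         ordered = sorted(target_results, key=lambda item: item.get("started_at", ""), reverse=True)
--         output[target] = {
--             "latest": ordered[0] if ordered else None,
--             "previous": ordered[1] if len(ordered) > 1 else None,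
--         }
--     return output
-- ===== SOURCE B (Python) =====
-- def latest_and_previous_results_by_target(results: list[dict]) -> dict[str, dict[str, dict | None]]:
--     # One pass, no sorting: keep the (latest, previous) pair per target online.
--     best: dict[str, tuple[dict | None, dict | None]] = {}
--     for result in results:
--         target = result.get("target_name", "unknown")
--         key = result.get("started_at", "")
--         latest, previous = best.get(target, (None, None))
--         if latest is None:
--             latest = result
--         elif key > latest.get("started_at", ""):
--             latest, previous = result, latest
--         elif previous is None or key > previous.get("started_at", ""):
--             previous = result
--         best[target] = (latest, previous)
--     return {target: {"latest": latest, "previous": previous}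
--             for target, (latest, previous) in best.items()}
-- ===== Notes on version B (the rewrite author's own statement) =====
-- stated objective: alternative
-- what changed: Replaces group-then-sort-each-group with a single pass that maintains an online (latest, previous) top-2 pair per target in one dict, so no list is ever sorted.
import Mathlib
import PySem

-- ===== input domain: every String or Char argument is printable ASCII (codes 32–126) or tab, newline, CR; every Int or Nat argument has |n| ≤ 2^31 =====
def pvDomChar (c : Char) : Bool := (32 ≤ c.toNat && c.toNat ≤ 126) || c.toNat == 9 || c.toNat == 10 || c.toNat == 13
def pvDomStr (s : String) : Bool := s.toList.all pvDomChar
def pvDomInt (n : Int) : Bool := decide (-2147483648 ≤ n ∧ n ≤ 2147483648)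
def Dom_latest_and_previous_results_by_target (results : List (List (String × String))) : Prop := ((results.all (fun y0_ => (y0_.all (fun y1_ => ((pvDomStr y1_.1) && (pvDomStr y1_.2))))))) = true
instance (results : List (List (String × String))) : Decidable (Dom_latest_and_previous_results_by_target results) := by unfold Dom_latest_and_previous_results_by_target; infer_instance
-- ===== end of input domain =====

-- B replaces A's group-then-sort-each-group with a single pass keeping an online (latest, previous)
-- top-2 pair per target, so no list is ever sorted (alternative algorithm, similar measured cost).


-- shared accessors: result.get("target_name", "unknown") and item.get("started_at", "")
def pvGetT (r : List (String × String)) : String := (PySem.Dict.mk r).getD "target_name" "unknown"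
def pvGetS (r : List (String × String)) : String := (PySem.Dict.mk r).getD "started_at" ""

-- ===== PORT A =====
def latest_and_previous_results_by_target (results : List (List (String × String))) : List (String × List (String × Option (List (String × String)))) :=
  let grouped : PySem.Dict String (List (List (String × String))) :=
    results.foldl (fun d result => d.modify (pvGetT result) [] (fun v => v ++ [result])) PySem.Dict.empty
  let output : PySem.Dict String (List (String × Option (List (String × String)))) :=
    grouped.items.foldl (fun out p =>
      let ordered := PySem.List.sorted p.2 pvGetS true
      -- 'ordered[0] if ordered else None' is ordered[0]?, 'ordered[1] if len(ordered) > 1 else None' is ordered[1]?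
      out.insert p.1 [("latest", ordered[0]?), ("previous", ordered[1]?)]) PySem.Dict.empty
  output.items

-- ===== PORT B =====
def pvTop2Step (lp : Option (List (String × String)) × Option (List (String × String)))
    (result : List (String × String)) :
    Option (List (String × String)) × Option (List (String × String)) :=
  let key := pvGetS result
  match lp with
  | (none, previous) => (some result, previous)
  | (some latest, previous) =>
    if pvGetS latest < key then (some result, some latest)
    else
      match previous with
      | none => (some latest, some result)
      | some p => if pvGetS p < key then (some latest, some result) else (some latest, some p)

def latest_and_previous_results_by_target_alt (results : List (List (String × String))) : List (String × List (String × Option (List (String × String)))) :=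
  let best : PySem.Dict String (Option (List (String × String)) × Option (List (String × String))) :=
    results.foldl (fun d result =>
      d.insert (pvGetT result) (pvTop2Step (d.getD (pvGetT result) (none, none)) result)) PySem.Dict.empty
  best.items.map (fun p => (p.1, [("latest", p.2.1), ("previous", p.2.2)]))

-- ===== PRECONDITION & SPEC =====
def Spec_latest_and_previous_results_by_target (results : List (List (String × String))) (out : List (String × List (String × Option (List (String × String))))) : Prop := out = latest_and_previous_results_by_target_alt results
instance (results : List (List (String × String))) (out : List (String × List (String × Option (List (String × String))))) : Decidable (Spec_latest_and_previous_results_by_target results out) := by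
  unfold Spec_latest_and_previous_results_by_target
  letI d1 : DecidableEq (List (String × String)) := inferInstance
  letI d2 : DecidableEq (Option (List (String × String))) := inferInstance
  letI d3 : DecidableEq (String × Option (List (String × String))) := inferInstance
  letI d4 : DecidableEq (List (String × Option (List (String × String)))) := inferInstance
  letI d5 : DecidableEq (String × List (String × Option (List (String × String)))) := inferInstance
  infer_instance

-- ===== CLAIM (what is proved, stated in full; the proofs are below) =====
def Claim_equal_latest_and_previous_results_by_target : Prop := ∀ (results : List (List (String × String))), Dom_latest_and_previous_results_by_target results → Spec_latest_and_previous_results_by_target results (latest_and_previous_results_by_target results)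

-- ===== LEMMAS AND PROOFS =====

-- one insertion step of the descending stable sort matches one online top-2 step
lemma pvTop2Step_insertBy (s : List (List (String × String))) (x : List (String × String)) :
    pvTop2Step (s[0]?, s[1]?) x =
      ((PySem.List.insertBy (fun a b => decide (pvGetS b < pvGetS a)) x s)[0]?,
       (PySem.List.insertBy (fun a b => decide (pvGetS b < pvGetS a)) x s)[1]?) := by
  match s with
  | [] => simp [PySem.List.insertBy, pvTop2Step]
  | [a] =>
    by_cases h : pvGetS a < pvGetS x <;>
      simp [PySem.List.insertBy, pvTop2Step, h]
  | a :: b :: t =>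
    by_cases h1 : pvGetS a < pvGetS x
    · simp [PySem.List.insertBy, pvTop2Step, h1]
    · by_cases h2 : pvGetS b < pvGetS x <;>
        simp [PySem.List.insertBy, pvTop2Step, h1, h2]

-- the online top-2 fold over a list is head/second of its stable descending sort
lemma pvTop2_foldl (g : List (List (String × String))) :
    g.foldl pvTop2Step (none, none) =
      ((PySem.List.sorted g pvGetS true)[0]?, (PySem.List.sorted g pvGetS true)[1]?) := by
  rw [PySem.List.sorted_rev_eq_foldl_insertBy]
  induction g using List.reverseRecOn with
  | nil => simp
  | append_singleton g x ih =>
    rw [List.foldl_append, List.foldl_append, ih]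
    simp only [List.foldl_cons, List.foldl_nil]
    exact pvTop2Step_insertBy _ x

-- A's grouping: lookup in the grouped dict is a filter of the input
lemma pvGrouped_getD (results : List (List (String × String))) (t : String) :
    (results.foldl (fun d result => d.modify (pvGetT result) [] (fun v => v ++ [result]))
        PySem.Dict.empty).getD t []
      = results.filter (fun r => pvGetT r == t) := by
  have h : results.foldl (fun d result => d.modify (pvGetT result) [] (fun v => v ++ [result]))
        PySem.Dict.empty
      = (results.map (fun r => (pvGetT r, r))).foldl
          (fun d p => d.modify p.1 [] (fun v => v ++ [p.2])) PySem.Dict.empty := by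
    rw [List.foldl_map]
  rw [h, PySem.Dict.getD_foldl_modify_append]
  simp [List.filter_map, Function.comp_def, List.map_map]

-- B's dict: lookup is the online top-2 fold over the same filter
lemma pvBest_getD (l : List (List (String × String)))
    (d : PySem.Dict String (Option (List (String × String)) × Option (List (String × String))))
    (t : String) :
    (l.foldl (fun d result =>
        d.insert (pvGetT result) (pvTop2Step (d.getD (pvGetT result) (none, none)) result)) d).getD
        t (none, none)
      = (l.filter (fun r => pvGetT r == t)).foldl pvTop2Step (d.getD t (none, none)) := by
  induction l generalizing d with
  | nil => rfl
  | cons r l ih =>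
    simp only [List.foldl_cons, List.filter_cons]
    by_cases h : pvGetT r = t
    · subst h
      simp only [beq_self_eq_true, if_true, List.foldl_cons, ih, PySem.Dict.getD_insert_self]
    · have hne : t ≠ pvGetT r := fun he => h he.symm
      simp only [beq_iff_eq, h, if_false, ih]
      rw [PySem.Dict.getD_insert_of_ne _ _ _ hne]

-- ===== VERDICT (by name: the statement is the Claim_ definition above) =====
theorem latest_and_previous_results_by_target_spec : Claim_equal_latest_and_previous_results_by_target := by
  intro results _
  unfold Spec_latest_and_previous_results_by_target
  simp only [latest_and_previous_results_by_target, latest_and_previous_results_by_target_alt]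
  set grouped := results.foldl (fun d result => d.modify (pvGetT result) [] (fun v => v ++ [result])) PySem.Dict.empty with hg
  set best := results.foldl (fun d result =>
      d.insert (pvGetT result) (pvTop2Step (d.getD (pvGetT result) (none, none)) result)) PySem.Dict.empty with hb
  have hgk : grouped.keys = PySem.Set.update PySem.Dict.empty.keys (results.map pvGetT) :=
    PySem.Dict.keys_foldl_modify_key results pvGetT [] (fun _ result v => v ++ [result]) _
  have hbk : best.keys = PySem.Set.update PySem.Dict.empty.keys (results.map pvGetT) :=
    PySem.Dict.keys_foldl_insert_key results pvGetT
      (fun d result => pvTop2Step (d.getD (pvGetT result) (none, none)) result) _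
  have hgnd : grouped.keys.Nodup :=
    PySem.Dict.nodup_keys_foldl_modify_key results pvGetT [] _ _ (by simp)
  have hbnd : best.keys.Nodup :=
    PySem.Dict.nodup_keys_foldl_insert_key results pvGetT _ _ (by simp)
  -- A's second loop inserts each grouped key once, in order
  have hfresh : (grouped.items.foldl (fun out p =>
      out.insert p.1 [("latest", (PySem.List.sorted p.2 pvGetS true)[0]?),
                      ("previous", (PySem.List.sorted p.2 pvGetS true)[1]?)])
        PySem.Dict.empty).items
      = grouped.items.map (fun p => (p.1,
          [("latest", (PySem.List.sorted p.2 pvGetS true)[0]?),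
           ("previous", (PySem.List.sorted p.2 pvGetS true)[1]?)])) := by
    have := PySem.Dict.items_foldl_insert_fresh grouped.items Prod.fst
      (fun p => [("latest", (PySem.List.sorted p.2 pvGetS true)[0]?),
                 ("previous", (PySem.List.sorted p.2 pvGetS true)[1]?)])
      (PySem.Dict.empty (κ := String) (ν := List (String × Option (List (String × String)))))
      (by intro a _; simp [PySem.Dict.contains_empty]) (by exact hgnd)
    simpa using this
  rw [hfresh]
  rw [PySem.Dict.items_eq_map_keys grouped hgnd [], PySem.Dict.items_eq_map_keys best hbnd (none, none)]
  rw [hgk, hbk]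
  simp only [List.map_map]
  apply List.map_congr_left
  intro t _
  simp only [Function.comp_apply]
  rw [hg, hb, pvGrouped_getD, pvBest_getD]
  have : (PySem.Dict.empty (κ := String)
      (ν := Option (List (String × String)) × Option (List (String × String)))).getD t (none, none)
      = (none, none) := by simp
  rw [this, pvTop2_foldl]
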